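-- pv_equiv track=rewrite | github.com/abhignagottumukkala/clausewise | app.py | classify_clause_type
-- ===== SOURCE A (Python) =====
-- def classify_clause_type(clause):
--     """Classify the type of clause"""
--     clause_lower = clause.lower()
--
--     if any(word in clause_lower for word in ["confidential", "non-disclosure"]):
--         return "Confidentiality"
--     elif any(word in clause_lower for word in ["termination", "terminate"]):
--         return "Termination"
--     elif any(word in clause_lower for word in ["payment", "pay", "fee"]):
--         return "Payment"
--     elif any(word in clause_lower for word in ["liability", "responsible"]):
--         return "Liability"
--     elif any(word in clause_lower for word in ["breach", "default"]):
--         return "Breach"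
--     elif any(word in clause_lower for word in ["governing law", "jurisdiction"]):
--         return "Governing Law"
--     elif any(word in clause_lower for word in ["dispute", "arbitration"]):
--         return "Dispute Resolution"
--     else:
--         return "General"
-- ===== SOURCE B (Python) =====
-- _KEYWORD_PRIORITY = {
--     "confidential": 0, "non-disclosure": 0,
--     "termination": 1, "terminate": 1,
--     "payment": 2, "pay": 2, "fee": 2,
--     "liability": 3, "responsible": 3,
--     "breach": 4, "default": 4,
--     "governing law": 5, "jurisdiction": 5,
--     "dispute": 6, "arbitration": 6,
-- }
--
-- _LABELS = ["Confidentiality", "Termination", "Payment", "Liability",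
--            "Breach", "Governing Law", "Dispute Resolution", "General"]
--
--
-- def classify_clause_type(clause):
--     """Classify the type of clause"""
--     clause_lower = clause.lower()
--     best = min((p for k, p in _KEYWORD_PRIORITY.items() if k in clause_lower),
--                default=len(_LABELS) - 1)
--     return _LABELS[best]
-- ===== Notes on version B (the rewrite author's own statement) =====
-- stated objective: alternative
-- what changed: Instead of a short-circuiting if/elif cascade, B checks every keyword against the lowercased clause, takes the minimum priority among all matches via a keyword->priority map, and indexes that priority into a label table (default = General).
import Mathlib
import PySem

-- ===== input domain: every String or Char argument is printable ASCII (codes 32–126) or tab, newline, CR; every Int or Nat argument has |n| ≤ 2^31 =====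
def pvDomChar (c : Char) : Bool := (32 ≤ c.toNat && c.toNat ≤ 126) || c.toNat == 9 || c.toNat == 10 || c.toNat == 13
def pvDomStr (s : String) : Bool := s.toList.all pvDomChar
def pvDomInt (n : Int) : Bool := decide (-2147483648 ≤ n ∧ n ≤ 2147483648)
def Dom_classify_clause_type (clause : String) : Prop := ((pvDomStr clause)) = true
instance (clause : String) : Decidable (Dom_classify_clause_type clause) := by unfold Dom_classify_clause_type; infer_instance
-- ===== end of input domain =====

-- B replaces the short-circuiting if/elif cascade by a min-over-all-matches computation:
-- every keyword carries a priority, B takes the minimum priority among all matching keywords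
-- and indexes it into a label table ("alternative": same cost, different algorithm).
-- ===== PORT A =====
def classify_clause_type (clause : String) : String :=
  let clause_lower := PySem.Str.lower clause
  if ["confidential", "non-disclosure"].any (fun word => PySem.Str.isIn word clause_lower) then
    "Confidentiality"
  else if ["termination", "terminate"].any (fun word => PySem.Str.isIn word clause_lower) then
    "Termination"
  else if ["payment", "pay", "fee"].any (fun word => PySem.Str.isIn word clause_lower) then
    "Payment"
  else if ["liability", "responsible"].any (fun word => PySem.Str.isIn word clause_lower) then
    "Liability"
  else if ["breach", "default"].any (fun word => PySem.Str.isIn word clause_lower) then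
    "Breach"
  else if ["governing law", "jurisdiction"].any (fun word => PySem.Str.isIn word clause_lower) then
    "Governing Law"
  else if ["dispute", "arbitration"].any (fun word => PySem.Str.isIn word clause_lower) then
    "Dispute Resolution"
  else
    "General"

-- ===== PORT B =====
-- _KEYWORD_PRIORITY dict as an association list in insertion order
def keywordPriority : List (String × Int) :=
  [("confidential", 0), ("non-disclosure", 0),
   ("termination", 1), ("terminate", 1),
   ("payment", 2), ("pay", 2), ("fee", 2),
   ("liability", 3), ("responsible", 3),
   ("breach", 4), ("default", 4),
   ("governing law", 5), ("jurisdiction", 5),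
   ("dispute", 6), ("arbitration", 6)]

def clauseLabels : List String :=
  ["Confidentiality", "Termination", "Payment", "Liability",
   "Breach", "Governing Law", "Dispute Resolution", "General"]

def classify_clause_type_alt (clause : String) : String :=
  let clause_lower := PySem.Str.lower clause
  -- min((p for k, p in _KEYWORD_PRIORITY.items() if k in clause_lower), default=len(_LABELS)-1)
  let best := (PySem.List.min?
      ((keywordPriority.filter (fun kp => PySem.Str.isIn kp.1 clause_lower)).map Prod.snd)
      (fun x => x)).getD ((clauseLabels.length : Int) - 1)
  -- _LABELS[best]; best is always a valid index, the .getD "" only makes the lookup total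
  (PySem.List.pyGet? clauseLabels best).getD ""

-- ===== PRECONDITION & SPEC =====
def Spec_classify_clause_type (clause : String) (out : String) : Prop := out = classify_clause_type_alt clause
instance (clause : String) (out : String) : Decidable (Spec_classify_clause_type clause out) := by unfold Spec_classify_clause_type; infer_instance

-- ===== CLAIM =====
def Claim_equal_classify_clause_type : Prop := ∀ (clause : String), Dom_classify_clause_type clause → Spec_classify_clause_type clause (classify_clause_type clause)

-- ===== LEMMAS AND PROOFS =====

-- first matching priority in a keyword table (proof-side helper)
def firstMatch (f : String → Bool) : List (String × Int) → Option Int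
  | [] => none
  | (k, p) :: rest => if f k then some p else firstMatch f rest

theorem foldl_min_of_le (p : Int) : ∀ (ps : List Int), (∀ x ∈ ps, p ≤ x) → ps.foldl min p = p := by
  intro ps
  induction ps with
  | nil => intro _; rfl
  | cons q t ih =>
      intro h
      have hq : p ≤ q := h q (by simp)
      simp only [List.foldl, min_eq_left hq]
      exact ih (fun x hx => h x (by simp [hx]))

-- on a table sorted by priority, min over all matches = the first match
theorem min_filtered (f : String → Bool) :
    ∀ (l : List (String × Int)), l.Pairwise (fun a b => a.2 ≤ b.2) →
    PySem.List.min? ((l.filter (fun kp => f kp.1)).map Prod.snd) (fun x => x) = firstMatch f l := by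
  intro l
  induction l with
  | nil => intro _; rfl
  | cons kp t ih =>
      intro h
      rw [List.pairwise_cons] at h
      obtain ⟨hle, ht⟩ := h
      by_cases hf : f kp.1
      · obtain ⟨k, p⟩ := kp
        simp only [List.filter_cons, hf, if_pos, List.map_cons, firstMatch]
        rw [PySem.List.min?_id_cons]
        have : ((t.filter (fun kp => f kp.1)).map Prod.snd).foldl min p = p := by
          apply foldl_min_of_le
          intro x hx
          simp only [List.mem_map, List.mem_filter] at hx
          obtain ⟨b, ⟨hb, _⟩, hx⟩ := hx
          exact hx ▸ hle b hb
        simp [this]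
      · obtain ⟨k, p⟩ := kp
        simp only [List.filter_cons, firstMatch, hf]
        simp only [Bool.false_eq_true, if_false] at *
        exact ih ht

-- A's cascade equals indexing the first match of the ordered table
theorem cascade_eq_firstMatch (f : String → Bool) :
    (if ["confidential", "non-disclosure"].any f then "Confidentiality"
     else if ["termination", "terminate"].any f then "Termination"
     else if ["payment", "pay", "fee"].any f then "Payment"
     else if ["liability", "responsible"].any f then "Liability"
     else if ["breach", "default"].any f then "Breach"
     else if ["governing law", "jurisdiction"].any f then "Governing Law"
     else if ["dispute", "arbitration"].any f then "Dispute Resolution"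
     else "General")
    = (PySem.List.pyGet? clauseLabels
        ((firstMatch f keywordPriority).getD ((clauseLabels.length : Int) - 1))).getD "" := by
  simp only [keywordPriority, firstMatch, List.any_cons, List.any_nil, Bool.or_false]
  by_cases h1 : f "confidential" <;> simp only [h1, if_true, Bool.true_or, Bool.false_or] <;> [rfl; skip]
  by_cases h2 : f "non-disclosure" <;> simp only [h2, if_true] <;> [rfl; skip]
  by_cases h3 : f "termination" <;> simp only [h3, if_true, Bool.true_or, Bool.false_or] <;> [rfl; skip]
  by_cases h4 : f "terminate" <;> simp only [h4, if_true] <;> [rfl; skip]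
  by_cases h5 : f "payment" <;> simp only [h5, if_true, Bool.true_or, Bool.false_or] <;> [rfl; skip]
  by_cases h6 : f "pay" <;> simp only [h6, if_true, Bool.true_or, Bool.false_or] <;> [rfl; skip]
  by_cases h7 : f "fee" <;> simp only [h7, if_true] <;> [rfl; skip]
  by_cases h8 : f "liability" <;> simp only [h8, if_true, Bool.true_or, Bool.false_or] <;> [rfl; skip]
  by_cases h9 : f "responsible" <;> simp only [h9, if_true] <;> [rfl; skip]
  by_cases h10 : f "breach" <;> simp only [h10, if_true, Bool.true_or, Bool.false_or] <;> [rfl; skip]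
  by_cases h11 : f "default" <;> simp only [h11, if_true] <;> [rfl; skip]
  by_cases h12 : f "governing law" <;> simp only [h12, if_true, Bool.true_or, Bool.false_or] <;> [rfl; skip]
  by_cases h13 : f "jurisdiction" <;> simp only [h13, if_true] <;> [rfl; skip]
  by_cases h14 : f "dispute" <;> simp only [h14, if_true, Bool.true_or, Bool.false_or] <;> [rfl; skip]
  by_cases h15 : f "arbitration" <;> simp only [h15, if_true] <;> rfl

theorem keywordPriority_sorted : keywordPriority.Pairwise (fun a b => a.2 ≤ b.2) := by
  unfold keywordPriority; decide

-- ===== VERDICT =====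
theorem classify_clause_type_spec : Claim_equal_classify_clause_type := by
  intro clause _
  unfold Spec_classify_clause_type classify_clause_type classify_clause_type_alt
  dsimp only
  rw [min_filtered (fun w => PySem.Str.isIn w (PySem.Str.lower clause)) keywordPriority keywordPriority_sorted]
  exact cascade_eq_firstMatch (fun w => PySem.Str.isIn w (PySem.Str.lower clause))
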